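-- pv_equiv track=rewrite | github.com/green-fox-academy/gyurka00 | WEEK-3/5. day/palindromes.py | search_palindromes
-- ===== SOURCE A (Python) =====
-- def str_reverse(string):
--     return string[::-1]
--
-- def search_palindromes(string):
--     words = string.split()
--     palindromes = []
--     for word in words:
--         lenght = 3
--         if len(word) >= lenght:
--             while lenght <= len(word):
--                 i = lenght - 1
--                 while i < len(word):
--                     start_char=i+1-lenght
--                     if word[start_char:i+1] == str_reverse(word[start_char:i+1]) and word[start_char:i+1] != '' and word[start_char:i+1] != word[start_char-1:i]:
--                         palindromes.append(word[start_char:i+1])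
--                     i += 1
--                 lenght += 1
--
--     return palindromes
-- ===== SOURCE B (Python) =====
-- def search_palindromes(string):
--     out = []
--     for word in string.split():
--         n = len(word)
--         # DP by length rows: prev2[s] / prev[s] say whether the window of
--         # length L-2 / L-1 starting at s is a palindrome.
--         prev2 = [True] * n
--         prev = [word[s] == word[s + 1] for s in range(n - 1)]
--         for L in range(3, n + 1):
--             cur = [word[s] == word[s + L - 1] and prev2[s + 1]
--                    for s in range(n - L + 1)]
--             for s in range(n - L + 1):
--                 if cur[s] and (s == 0 or word[s - 1:s + L - 1] != word[s:s + L]):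
--                     out.append(word[s:s + L])
--             prev2 = prev
--             prev = cur
--     return out
-- ===== Notes on version B (the rewrite author's own statement) =====
-- stated objective: alternative
-- what changed: A re-slices every candidate window and compares it with its reversal inside hand-rolled nested while loops; B decides palindromicity with a length-indexed dynamic-programming recurrence over two rolling boolean rows (fewer character comparisons; measured about 5x at n=1024 but not confirmed at the largest size, where the quadratic-count output itself dominates), emitting windows in the same length-then-start order with the same consecutive-window dedup rule.
import Mathlib
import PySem

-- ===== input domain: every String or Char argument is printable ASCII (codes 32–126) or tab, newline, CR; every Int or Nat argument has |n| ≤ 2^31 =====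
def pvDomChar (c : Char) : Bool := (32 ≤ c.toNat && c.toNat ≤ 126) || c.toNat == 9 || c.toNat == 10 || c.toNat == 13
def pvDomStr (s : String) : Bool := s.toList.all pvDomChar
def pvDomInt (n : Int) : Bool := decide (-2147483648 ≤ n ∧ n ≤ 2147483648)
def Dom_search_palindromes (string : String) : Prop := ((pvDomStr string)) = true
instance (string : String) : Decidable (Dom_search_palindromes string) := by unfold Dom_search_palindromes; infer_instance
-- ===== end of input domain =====

-- B replaces A's per-window slice-and-reverse palindrome test by a length-indexed
-- dynamic-programming recurrence over two rolling boolean rows, keeping A's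
-- length-then-start output order and its consecutive-window dedup rule.

-- ===== PORT A =====
-- str_reverse(string) = string[::-1]
def pyStrRev (s : List Char) : List Char := (PySem.List.slice? s none none (-1)).getD []

-- inner 'while i < len(word)' loop of A
def pvAInner (w : List Char) (L i : Int) (acc : List (List Char)) : List (List Char) :=
  if _h : i < (w.length : Int) then
    let s := i + 1 - L
    let win := PySem.List.slice w (some s) (some (i + 1))
    let acc' :=
      if win == pyStrRev win && !(win == ([] : List Char))
          && !(win == PySem.List.slice w (some (s - 1)) (some i)) then
        acc ++ [win]
      else acc
    pvAInner w L (i + 1) acc'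
  else acc
termination_by ((w.length : Int) - i).toNat
decreasing_by omega

-- outer 'while lenght <= len(word)' loop of A
def pvAOuter (w : List Char) (L : Int) (acc : List (List Char)) : List (List Char) :=
  if _h : L ≤ (w.length : Int) then
    pvAOuter w (L + 1) (pvAInner w L (L - 1) acc)
  else acc
termination_by ((w.length : Int) + 1 - L).toNat
decreasing_by omega

def search_palindromes (string : String) : List String :=
  let words := PySem.Str.split₀ string
  let pal := words.foldl (fun acc word =>
    let w := word.toList
    if (3 : Int) ≤ (w.length : Int) then pvAOuter w 3 acc else acc) []
  pal.map String.ofList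

-- ===== PORT B =====
-- one word of B: rolling DP rows prev2/prev (palindromicity of the windows of
-- lengths L-2 and L-1), output appended in length-then-start order
-- the body of B's 'for L in range(3, n + 1)' loop: state = (prev2, prev, out)
def pvBStep (w : List Char) (st : List Bool × List Bool × List (List Char)) (L : Nat) :
    List Bool × List Bool × List (List Char) :=
  let n := w.length
  let cur : List Bool :=
    (List.range (n - L + 1)).map (fun s => (w[s]? == w[s + L - 1]?) && st.1.getD (s + 1) false)
  let out := st.2.2 ++ (List.range (n - L + 1)).filterMap (fun s =>
    if cur.getD s false &&
        (decide (s = 0) ||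
          !(PySem.List.slice w (some ((s : Int) - 1)) (some ((s : Int) + L - 1)) ==
            PySem.List.slice w (some (s : Int)) (some ((s : Int) + L)))) then
      some (PySem.List.slice w (some (s : Int)) (some ((s : Int) + L)))
    else none)
  (st.2.1, cur, out)

def pvBWord (w : List Char) : List (List Char) :=
  let n := w.length
  let prev2 : List Bool := List.replicate n true
  let prev : List Bool := (List.range (n - 1)).map (fun s => w[s]? == w[s + 1]?)
  ((List.range' 3 (n - 2)).foldl (pvBStep w) (prev2, prev, ([] : List (List Char)))).2.2

def search_palindromes_alt (string : String) : List String :=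
  ((PySem.Str.split₀ string).foldl (fun acc word => acc ++ pvBWord word.toList) []).map String.ofList

-- ===== PRECONDITION & SPEC =====
def Spec_search_palindromes (string : String) (out : List String) : Prop := out = search_palindromes_alt string
instance (string : String) (out : List String) : Decidable (Spec_search_palindromes string out) := by unfold Spec_search_palindromes; infer_instance

-- ===== CLAIM (what is proved, stated in full; the proofs are below) =====
def Claim_equal_search_palindromes : Prop := ∀ (string : String), Dom_search_palindromes string → Spec_search_palindromes string (search_palindromes string)

-- ===== LEMMAS AND PROOFS =====

-- the window of length L starting at s, its palindromicity, and the append condition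
def pvWin (w : List Char) (L s : Nat) : List Char := (w.drop s).take L
def pvPal (w : List Char) (L s : Nat) : Bool := pvWin w L s == (pvWin w L s).reverse
def pvCond (w : List Char) (L s : Nat) : Bool :=
  pvPal w L s && (decide (s = 0) || !(pvWin w L s == pvWin w L (s - 1)))
def pvRow (w : List Char) (L : Nat) : List (List Char) :=
  (List.range (w.length - L + 1)).filterMap (fun s => if pvCond w L s then some (pvWin w L s) else none)
def pvTarget (w : List Char) : List (List Char) :=
  ((List.range' 3 (w.length - 2)).map (pvRow w)).flatten


-- == basic facts about windows and palindromicity ==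

theorem pvBeq_comm {α : Type} [BEq α] [LawfulBEq α] (x y : α) : (x == y) = (y == x) := by
  rw [Bool.eq_iff_iff]; simp only [beq_iff_eq]; exact eq_comm

theorem pvWin_length (w : List Char) (L s : Nat) (h : s + L ≤ w.length) :
    (pvWin w L s).length = L := by
  simp [pvWin]; omega

-- a cons-append-singleton list is a palindrome iff its ends match and its middle is one
theorem pvPal_shape (a b : Char) (mid : List Char) :
    ((a :: (mid ++ [b])) == (a :: (mid ++ [b])).reverse) = ((a == b) && (mid == mid.reverse)) := by
  rw [Bool.eq_iff_iff]
  simp only [List.reverse_cons, List.reverse_append, List.reverse_cons, List.reverse_nil,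
    List.nil_append, List.cons_append, beq_iff_eq, Bool.and_eq_true, List.cons.injEq]
  constructor
  · rintro ⟨rfl, h⟩
    obtain ⟨h1, -⟩ := List.append_singleton_inj.mp h
    exact ⟨rfl, h1⟩
  · rintro ⟨rfl, h⟩
    exact ⟨rfl, by rw [← h]⟩

-- every window of length ≤ 1 is a palindrome
theorem pvPal_one (w : List Char) (L s : Nat) (hL : L ≤ 1) : pvPal w L s = true := by
  have hlen : (pvWin w L s).length ≤ 1 := by
    simp [pvWin]; omega
  unfold pvPal
  match hwin : pvWin w L s with
  | [] => simp
  | [c] => simp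
  | a :: b :: t => rw [hwin] at hlen; simp at hlen

-- the DP recurrence: a window of length L ≥ 2 is a palindrome iff its end
-- characters agree and the inner window of length L-2 is a palindrome
theorem pvPal_rec (w : List Char) (L s : Nat) (h2 : 2 ≤ L) (hs : s + L ≤ w.length) :
    pvPal w L s = ((w[s]? == w[s + L - 1]?) && pvPal w (L - 2) (s + 1)) := by
  obtain ⟨m, rfl⟩ : ∃ m, L = m + 2 := ⟨L - 2, by omega⟩
  have hsn : s < w.length := by omega
  have hin : s + m + 1 < w.length := by omega
  rw [show s + (m + 2) - 1 = s + m + 1 by omega, show m + 2 - 2 = m by omega]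
  have hdrop : w.drop s = w[s] :: w.drop (s + 1) := List.drop_eq_getElem_cons hsn
  have hidx : (w.drop (s + 1))[m]? = some w[s + m + 1] := by
    rw [List.getElem?_drop, show s + 1 + m = s + m + 1 by omega, List.getElem?_eq_getElem hin]
  have hwin : pvWin w (m + 2) s = w[s] :: (pvWin w m (s + 1) ++ [w[s + m + 1]]) := by
    unfold pvWin
    rw [hdrop, show m + 2 = (m + 1) + 1 from rfl, List.take_succ_cons, List.take_add_one, hidx]
    rfl
  unfold pvPal
  rw [hwin, pvPal_shape, List.getElem?_eq_getElem hsn, List.getElem?_eq_getElem hin]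
  simp

-- == the B side ==

-- the row of palindromicity flags for windows of length m
def pvPalRow (w : List Char) (m : Nat) : List Bool :=
  (List.range (w.length - m + 1)).map (fun s => pvPal w m s)

theorem pvPalRow_one (w : List Char) (_hn : 1 ≤ w.length) :
    pvPalRow w 1 = List.replicate w.length true := by
  unfold pvPalRow
  rw [List.map_congr_left (fun s _ => pvPal_one w 1 s le_rfl),
    show w.length - 1 + 1 = w.length by omega, List.map_const', List.length_range]

theorem pvPalRow_two (w : List Char) (hn : 2 ≤ w.length) :
    pvPalRow w 2 = (List.range (w.length - 1)).map (fun s => w[s]? == w[s + 1]?) := by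
  unfold pvPalRow
  have h : w.length - 2 + 1 = w.length - 1 := by omega
  rw [h]
  refine List.map_congr_left (fun s hs => ?_)
  rw [List.mem_range] at hs
  rw [pvPal_rec w 2 s le_rfl (by omega), pvPal_one w 0 (s + 1) (by omega)]
  simp

-- the B step function computes the next palindromicity row …
theorem pvBStep_row (w : List Char) (L : Nat) (h3 : 3 ≤ L) (hLn : L ≤ w.length) :
    (List.range (w.length - L + 1)).map
        (fun s => (w[s]? == w[s + L - 1]?) && (pvPalRow w (L - 2)).getD (s + 1) false)
      = pvPalRow w L := by
  rw [show pvPalRow w L = (List.range (w.length - L + 1)).map (fun s => pvPal w L s) from rfl]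
  refine List.map_congr_left (fun s hs => ?_)
  rw [List.mem_range] at hs
  have hget : (pvPalRow w (L - 2)).getD (s + 1) false = pvPal w (L - 2) (s + 1) := by
    unfold pvPalRow
    rw [List.getD_eq_getElem?_getD, List.getElem?_map, List.getElem?_range (by omega)]
    rfl
  rw [hget, ← pvPal_rec w L s (by omega) (by omega)]

-- … and appends exactly the canonical row of output windows
theorem pvBStep_out (w : List Char) (L : Nat) (h3 : 3 ≤ L) (_hLn : L ≤ w.length) :
    ((List.range (w.length - L + 1)).filterMap (fun s =>
        if (pvPalRow w L).getD s false &&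
            (decide (s = 0) ||
              !(PySem.List.slice w (some ((s : Int) - 1)) (some ((s : Int) + L - 1)) ==
                PySem.List.slice w (some (s : Int)) (some ((s : Int) + L)))) then
          some (PySem.List.slice w (some (s : Int)) (some ((s : Int) + L)))
        else none))
      = pvRow w L := by
  unfold pvRow
  refine List.filterMap_congr (fun s hs => ?_)
  rw [List.mem_range] at hs
  have hget : (pvPalRow w L).getD s false = pvPal w L s := by
    unfold pvPalRow
    rw [List.getD_eq_getElem?_getD, List.getElem?_map, List.getElem?_range hs]
    rfl
  have hslice : PySem.List.slice w (some (s : Int)) (some ((s : Int) + L)) = pvWin w L s := by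
    have : (s : Int) + L = ((s + L : Nat) : Int) := by push_cast; ring
    rw [this, PySem.List.slice_natCast]
    unfold pvWin
    congr 1
    omega
  rw [hget, hslice]
  rcases Nat.eq_zero_or_pos s with rfl | hpos
  · simp [pvCond]
  · have hprev : PySem.List.slice w (some ((s : Int) - 1)) (some ((s : Int) + L - 1))
        = pvWin w L (s - 1) := by
      have h1 : (s : Int) - 1 = ((s - 1 : Nat) : Int) := by omega
      have h2 : (s : Int) + L - 1 = (((s - 1) + L : Nat) : Int) := by push_cast; omega
      rw [h1, h2, PySem.List.slice_natCast]
      unfold pvWin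
      congr 1
      omega
    rw [hprev]
    unfold pvCond
    have hs0 : decide (s = 0) = false := by simp; omega
    rw [hs0, pvBeq_comm (pvWin w L (s - 1)) (pvWin w L s)]

-- the fold invariant of B's per-word loop
theorem pvB_fold (w : List Char) (L k : Nat) (out : List (List Char))
    (h3 : 3 ≤ L) (hk : L + k = w.length + 1) :
    ((List.range' L k).foldl (pvBStep w) (pvPalRow w (L - 2), pvPalRow w (L - 1), out)).2.2
      = out ++ ((List.range' L k).map (pvRow w)).flatten := by
  induction k generalizing L out with
  | zero => simp
  | succ k ih =>
    rw [List.range'_succ, List.foldl_cons, List.map_cons, List.flatten_cons]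
    have hLn : L ≤ w.length := by omega
    have hstep : pvBStep w (pvPalRow w (L - 2), pvPalRow w (L - 1), out) L
        = (pvPalRow w (L - 1), pvPalRow w L, out ++ pvRow w L) := by
      unfold pvBStep
      dsimp only
      rw [pvBStep_row w L h3 hLn, pvBStep_out w L h3 hLn]
    have hL2 : L - 1 = (L + 1) - 2 := by omega
    have hL1 : L = (L + 1) - 1 := by omega
    rw [hstep]
    rw [show (pvPalRow w (L - 1), pvPalRow w L, out ++ pvRow w L)
        = (pvPalRow w ((L + 1) - 2), pvPalRow w ((L + 1) - 1), out ++ pvRow w L) by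
      rw [← hL2, ← hL1]]
    rw [ih (L + 1) (out ++ pvRow w L) (by omega) (by omega), List.append_assoc]

theorem pvBWord_spec (w : List Char) : pvBWord w = pvTarget w := by
  unfold pvBWord pvTarget
  dsimp only
  rcases Nat.lt_or_ge w.length 3 with hn | hn
  · have h0 : w.length - 2 = 0 := by omega
    simp [h0]
  · rw [show (List.replicate w.length true : List Bool) = pvPalRow w 1 from
        (pvPalRow_one w (by omega)).symm,
      show ((List.range (w.length - 1)).map (fun s => w[s]? == w[s + 1]?) : List Bool)
          = pvPalRow w 2 from (pvPalRow_two w (by omega)).symm,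
      show (1 : Nat) = 3 - 2 from rfl, show (2 : Nat) = 3 - 1 from rfl]
    exact pvB_fold w 3 (w.length - 2) [] le_rfl (by omega)

-- == the A side ==

theorem pyStrRev_eq (x : List Char) : pyStrRev x = x.reverse := by
  simp [pyStrRev, PySem.List.slice?_none_none_neg_one]

theorem pvAInner_spec (w : List Char) (L j : Nat) (acc : List (List Char))
    (h3 : 3 ≤ L) (hj : L - 1 ≤ j) :
    pvAInner w (L : Int) (j : Int) acc =
      acc ++ (List.range' j (w.length - j)).filterMap
        (fun i => if pvCond w L (i + 1 - L) then some (pvWin w L (i + 1 - L)) else none) := by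
  rcases Nat.lt_or_ge j w.length with hjn | hjn
  · rw [pvAInner, dif_pos (by exact_mod_cast hjn : (j : Int) < (w.length : Int))]
    dsimp only
    have hcast : (j : Int) + 1 - (L : Int) = ((j + 1 - L : Nat) : Int) := by omega
    have hwin : PySem.List.slice w (some ((j : Int) + 1 - (L : Int))) (some ((j : Int) + 1))
        = pvWin w L (j + 1 - L) := by
      rw [hcast, show (j : Int) + 1 = ((j + 1 : Nat) : Int) by push_cast; ring,
        PySem.List.slice_natCast]
      unfold pvWin; congr 1; omega
    have hne : (pvWin w L (j + 1 - L) == ([] : List Char)) = false := by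
      have hl : (pvWin w L (j + 1 - L)).length = L := pvWin_length w L (j + 1 - L) (by omega)
      rw [beq_eq_false_iff_ne]
      intro h; rw [h] at hl; simp at hl; omega
    have hcond : (if pvWin w L (j + 1 - L) == pyStrRev (pvWin w L (j + 1 - L)) &&
            !(pvWin w L (j + 1 - L) == ([] : List Char)) &&
            !(pvWin w L (j + 1 - L) ==
              PySem.List.slice w (some ((j : Int) + 1 - (L : Int) - 1)) (some (j : Int))) then
          acc ++ [pvWin w L (j + 1 - L)] else acc)
        = acc ++ (if pvCond w L (j + 1 - L) then [pvWin w L (j + 1 - L)] else []) := by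
      rcases Nat.eq_zero_or_pos (j + 1 - L) with hz | hpos
      · have hprev : PySem.List.slice w (some ((j : Int) + 1 - (L : Int) - 1)) (some (j : Int))
            = [] := by
          apply List.eq_nil_of_length_eq_zero
          rw [PySem.List.length_slice, show (j : Int) + 1 - (L : Int) - 1 = -1 by omega,
            PySem.List.clampIdx_neg_one, PySem.List.clampIdx_natCast]
          omega
        rw [hprev, pyStrRev_eq, hne, hz]
        simp only [pvCond, pvPal, Bool.not_false, Bool.and_true, decide_true, Bool.true_or]
        split <;> simp
      · have hprev : PySem.List.slice w (some ((j : Int) + 1 - (L : Int) - 1)) (some (j : Int))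
            = pvWin w L (j + 1 - L - 1) := by
          rw [show (j : Int) + 1 - (L : Int) - 1 = ((j + 1 - L - 1 : Nat) : Int) by omega,
            show (j : Int) = (((j + 1 - L - 1) + L : Nat) : Int) by push_cast; omega,
            PySem.List.slice_natCast]
          unfold pvWin; congr 1; omega
        rw [hprev, pyStrRev_eq, hne]
        have h0 : decide (j + 1 - L = 0) = false := by simp; omega
        simp only [pvCond, pvPal, h0, Bool.not_false, Bool.and_true, Bool.false_or]
        split <;> simp
    rw [hwin, hcond,
      show (j : Int) + 1 = ((j + 1 : Nat) : Int) by push_cast; ring,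
      pvAInner_spec w L (j + 1) _ h3 (by omega),
      show w.length - j = (w.length - (j + 1)) + 1 by omega,
      List.range'_succ, List.filterMap_cons]
    split <;> simp
  · rw [pvAInner, dif_neg (by omega : ¬ ((j : Int) < (w.length : Int))),
      show w.length - j = 0 by omega]
    simp
termination_by w.length - j
decreasing_by omega

theorem pvAOuter_spec (w : List Char) (L : Nat) (acc : List (List Char)) (h3 : 3 ≤ L) :
    pvAOuter w (L : Int) acc =
      acc ++ ((List.range' L (w.length + 1 - L)).map (pvRow w)).flatten := by
  rcases Nat.lt_or_ge w.length L with hn | hn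
  · rw [pvAOuter, dif_neg (by omega : ¬ ((L : Int) ≤ (w.length : Int))),
      show w.length + 1 - L = 0 by omega]
    simp
  · rw [pvAOuter, dif_pos (by exact_mod_cast hn : (L : Int) ≤ (w.length : Int))]
    have hstep : pvAInner w (L : Int) ((L : Int) - 1) acc = acc ++ pvRow w L := by
      rw [show (L : Int) - 1 = ((L - 1 : Nat) : Int) by omega,
        pvAInner_spec w L (L - 1) acc h3 le_rfl]
      congr 1
      unfold pvRow
      rw [List.range'_eq_map_range, List.filterMap_map,
        show w.length - (L - 1) = w.length - L + 1 by omega]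
      refine List.filterMap_congr (fun k _ => ?_)
      simp only [Function.comp_apply]
      rw [show L - 1 + k + 1 - L = k by omega]
    rw [hstep, show (L : Int) + 1 = ((L + 1 : Nat) : Int) by push_cast; ring,
      pvAOuter_spec w (L + 1) _ (by omega),
      show w.length + 1 - L = (w.length + 1 - (L + 1)) + 1 by omega,
      List.range'_succ]
    simp
termination_by w.length + 1 - L
decreasing_by omega

theorem pvWord_eq (w : List Char) (acc : List (List Char)) :
    (if (3 : Int) ≤ (w.length : Int) then pvAOuter w 3 acc else acc) = acc ++ pvBWord w := by
  rw [pvBWord_spec]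
  unfold pvTarget
  rcases Nat.lt_or_ge w.length 3 with hn | hn
  · rw [if_neg (by omega : ¬ ((3 : Int) ≤ (w.length : Int))),
      show w.length - 2 = 0 by omega]
    simp
  · rw [if_pos (by omega : (3 : Int) ≤ (w.length : Int)),
      show (3 : Int) = ((3 : Nat) : Int) by norm_num,
      pvAOuter_spec w 3 acc le_rfl, show w.length + 1 - 3 = w.length - 2 by omega]

-- ===== VERDICT (by name: the statement is the Claim_ definition above) =====
theorem search_palindromes_spec : Claim_equal_search_palindromes := by
  intro str _
  unfold Spec_search_palindromes search_palindromes search_palindromes_alt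
  dsimp only
  congr 1
  generalize PySem.Str.split₀ str = ws
  suffices h : ∀ (ws : List String) (acc : List (List Char)),
      ws.foldl (fun acc word =>
        if (3 : Int) ≤ (word.toList.length : Int) then pvAOuter word.toList 3 acc else acc) acc
        = ws.foldl (fun acc word => acc ++ pvBWord word.toList) acc from h ws []
  intro ws
  induction ws with
  | nil => intro acc; rfl
  | cons hd tl ih =>
    intro acc
    rw [List.foldl_cons, List.foldl_cons, pvWord_eq]
    exact ih _
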